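-- pv_equiv track=rewrite | github.com/DeepikaVenkatesh1/A2Z-striver-sheet | DAY 11/elementsWithHighLowFreq.py | highestLowestFreqAll
-- ===== SOURCE A (Python) =====
-- def highestLowestFreqAll(arr: list[int]) -> tuple:
--     freq = {}
--     for num in arr:
--         freq[num] = freq.get(num, 0) + 1
--
--     max_count = max(freq.values())
--     min_count = min(freq.values())
--
--     # collect ALL elements sharing the max/min frequency
--     highest = [k for k, v in freq.items() if v == max_count]
--     lowest  = [k for k, v in freq.items() if v == min_count]
--
--     return sorted(highest), sorted(lowest)
-- ===== SOURCE B (Python) =====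
-- def highestLowestFreqAll(arr: list[int]) -> tuple:
--     freq = {}
--     for num in arr:
--         freq[num] = freq.get(num, 0) + 1
--
--     # inverted index: frequency count -> elements having that count
--     buckets = {}
--     for k, v in freq.items():
--         buckets.setdefault(v, []).append(k)
--
--     max_count = max(buckets)
--     min_count = min(buckets)
--
--     return sorted(buckets[max_count]), sorted(buckets[min_count])
-- ===== Notes on version B (the rewrite author's own statement) =====
-- stated objective: alternative
-- what changed: Replaces A's two value-filtering passes over the items with an inverted index (count -> elements bucket) built once, with max/min taken over the bucket keys and the answer read off by two direct lookups.
import Mathlib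
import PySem

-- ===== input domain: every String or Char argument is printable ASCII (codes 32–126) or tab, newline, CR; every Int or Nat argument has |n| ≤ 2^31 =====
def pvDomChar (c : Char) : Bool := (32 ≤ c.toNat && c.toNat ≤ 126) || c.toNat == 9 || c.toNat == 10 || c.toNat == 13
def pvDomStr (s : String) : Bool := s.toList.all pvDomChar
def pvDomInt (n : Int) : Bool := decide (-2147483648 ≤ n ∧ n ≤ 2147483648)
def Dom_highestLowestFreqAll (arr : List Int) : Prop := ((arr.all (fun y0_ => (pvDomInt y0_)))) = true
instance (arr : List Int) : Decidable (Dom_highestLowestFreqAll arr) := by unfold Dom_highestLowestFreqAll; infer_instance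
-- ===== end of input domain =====

-- B replaces A's two value-filtering passes with an inverted index (count -> bucket of elements)
-- and direct lookups at max/min key; same cost, different structure. Pre_ excludes the empty list,
-- on which both Pythons raise ValueError (max of an empty sequence).

-- ===== PORT A =====
def highestLowestFreqAll (arr : List Int) : List Int × List Int :=
  let freq := arr.foldl (fun d num => d.insert num (d.getD num 0 + 1)) (PySem.Dict.empty : PySem.Dict Int Int)
  match PySem.List.max? freq.values (fun v => v), PySem.List.min? freq.values (fun v => v) with
  | some maxCount, some minCount =>
      let highest := (freq.items.filter (fun p => p.2 == maxCount)).map (·.1)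
      let lowest  := (freq.items.filter (fun p => p.2 == minCount)).map (·.1)
      (PySem.List.sorted highest (fun x => x) false, PySem.List.sorted lowest (fun x => x) false)
  | _, _ => ([], [])   -- unreachable under Pre_ (arr ≠ []): Python raises ValueError here

-- ===== PORT B =====
def highestLowestFreqAll_alt (arr : List Int) : List Int × List Int :=
  let freq := arr.foldl (fun d num => d.insert num (d.getD num 0 + 1)) (PySem.Dict.empty : PySem.Dict Int Int)
  let buckets := freq.items.foldl (fun d p => d.modify p.2 [] (fun l => l ++ [p.1])) (PySem.Dict.empty : PySem.Dict Int (List Int))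
  match PySem.List.max? buckets.keys (fun v => v) with
  | none => ([], [])   -- unreachable under Pre_ (arr ≠ []): Python raises ValueError here
  | some maxCount =>
      match PySem.List.min? buckets.keys (fun v => v) with
      | none => ([], [])
      | some minCount =>
          (PySem.List.sorted (buckets.getD maxCount []) (fun x => x) false,
           PySem.List.sorted (buckets.getD minCount []) (fun x => x) false)

-- ===== PRECONDITION & SPEC =====
-- Pre_ excludes exactly the empty list, on which the Python A raises ValueError.
def Pre_highestLowestFreqAll (arr : List Int) : Prop := arr ≠ []
instance (arr : List Int) : Decidable (Pre_highestLowestFreqAll arr) := by unfold Pre_highestLowestFreqAll; infer_instance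
def pvWitness_highestLowestFreqAll : List Int := [1, 2, 2]

def Spec_highestLowestFreqAll (arr : List Int) (out : List Int × List Int) : Prop := out = highestLowestFreqAll_alt arr
instance (arr : List Int) (out : List Int × List Int) : Decidable (Spec_highestLowestFreqAll arr out) := by unfold Spec_highestLowestFreqAll; infer_instance

-- ===== CLAIM (what is proved, stated in full; the proofs are below) =====
def Claim_equal_highestLowestFreqAll : Prop := ∀ (arr : List Int), Dom_highestLowestFreqAll arr → Pre_highestLowestFreqAll arr → Spec_highestLowestFreqAll arr (highestLowestFreqAll arr)

-- ===== LEMMAS AND PROOFS =====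

-- max?/min? with the identity key depend only on the membership set of the list
theorem max?_id_congr_mem (l1 l2 : List Int) (h : ∀ x, x ∈ l1 ↔ x ∈ l2) :
    PySem.List.max? l1 (fun x => x) = PySem.List.max? l2 (fun x => x) := by
  cases h1 : PySem.List.max? l1 (fun x => x) with
  | none =>
      rw [PySem.List.max?_eq_none_iff] at h1
      subst h1
      symm; rw [PySem.List.max?_eq_none_iff]
      cases l2 with
      | nil => rfl
      | cons a t => exact absurd ((h a).2 (List.mem_cons_self)) (List.not_mem_nil)
  | some m =>
      cases h2 : PySem.List.max? l2 (fun x => x) with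
      | none =>
          rw [PySem.List.max?_eq_none_iff] at h2; subst h2
          exact absurd ((h m).1 (PySem.List.max?_mem h1)) (List.not_mem_nil)
      | some m' =>
          have hm : m ∈ l2 := (h m).1 (PySem.List.max?_mem h1)
          have hm' : m' ∈ l1 := (h m').2 (PySem.List.max?_mem h2)
          have h1' := PySem.List.max?_isMax h1 m' hm'
          have h2' := PySem.List.max?_isMax h2 m hm
          simp only [le_antisymm h1' h2']

theorem min?_id_congr_mem (l1 l2 : List Int) (h : ∀ x, x ∈ l1 ↔ x ∈ l2) :
    PySem.List.min? l1 (fun x => x) = PySem.List.min? l2 (fun x => x) := by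
  cases h1 : PySem.List.min? l1 (fun x => x) with
  | none =>
      rw [PySem.List.min?_eq_none_iff] at h1
      subst h1
      symm; rw [PySem.List.min?_eq_none_iff]
      cases l2 with
      | nil => rfl
      | cons a t => exact absurd ((h a).2 (List.mem_cons_self)) (List.not_mem_nil)
  | some m =>
      cases h2 : PySem.List.min? l2 (fun x => x) with
      | none =>
          rw [PySem.List.min?_eq_none_iff] at h2; subst h2
          exact absurd ((h m).1 (PySem.List.min?_mem h1)) (List.not_mem_nil)
      | some m' =>
          have hm : m ∈ l2 := (h m).1 (PySem.List.min?_mem h1)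
          have hm' : m' ∈ l1 := (h m').2 (PySem.List.min?_mem h2)
          have h1' := PySem.List.min?_isMin h1 m' hm'
          have h2' := PySem.List.min?_isMin h2 m hm
          simp only [le_antisymm h2' h1']

-- B's bucket at count c is exactly A's filtered key list at count c
theorem buckets_getD (items : List (Int × Int)) (c : Int) :
    (items.foldl (fun d p => d.modify p.2 [] (fun l => l ++ [p.1])) (PySem.Dict.empty : PySem.Dict Int (List Int))).getD c []
      = (items.filter (fun p => p.2 == c)).map (·.1) := by
  have hmap : items.foldl (fun d p => d.modify p.2 [] (fun l => l ++ [p.1])) (PySem.Dict.empty : PySem.Dict Int (List Int))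
      = (items.map (fun p => (p.2, p.1))).foldl (fun d q => d.modify q.1 [] (fun l => l ++ [q.2])) PySem.Dict.empty := by
    rw [List.foldl_map]
  rw [hmap, PySem.Dict.getD_foldl_modify_append, PySem.Dict.getD_empty, List.nil_append,
      List.filter_map]
  rw [List.map_map]
  rfl

-- the bucket keys are, as a set, the frequency values
theorem buckets_contains (items : List (Int × Int)) (d : PySem.Dict Int (List Int)) (x : Int) :
    (items.foldl (fun d p => d.modify p.2 [] (fun l => l ++ [p.1])) d).contains x = true
      ↔ d.contains x = true ∨ x ∈ items.map (·.2) := by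
  induction items generalizing d with
  | nil => simp
  | cons a t ih =>
      simp only [List.foldl_cons, List.map_cons, List.mem_cons, ih, PySem.Dict.contains_modify]
      constructor
      · rintro (h | h)
        · rcases Bool.or_eq_true_iff.mp h with h | h
          · exact Or.inr (Or.inl (eq_of_beq h))
          · exact Or.inl h
        · exact Or.inr (Or.inr h)
      · rintro (h | h | h)
        · exact Or.inl (Bool.or_eq_true_iff.mpr (Or.inr h))
        · exact Or.inl (Bool.or_eq_true_iff.mpr (Or.inl (by simp [h])))
        · exact Or.inr h

theorem buckets_keys_mem (items : List (Int × Int)) (x : Int) :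
    x ∈ (items.foldl (fun d p => d.modify p.2 [] (fun l => l ++ [p.1])) (PySem.Dict.empty : PySem.Dict Int (List Int))).keys
      ↔ x ∈ items.map (·.2) := by
  rw [← PySem.Dict.contains_iff_mem_keys, buckets_contains]
  simp [PySem.Dict.contains_empty]

-- the two cores agree for every frequency dict
theorem cores_agree (freq : PySem.Dict Int Int) :
    (match PySem.List.max? freq.values (fun v => v), PySem.List.min? freq.values (fun v => v) with
     | some maxCount, some minCount =>
         ((PySem.List.sorted ((freq.items.filter (fun p => p.2 == maxCount)).map (·.1)) (fun x => x) false),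
          (PySem.List.sorted ((freq.items.filter (fun p => p.2 == minCount)).map (·.1)) (fun x => x) false))
     | _, _ => (([] : List Int), ([] : List Int)))
    =
    (let buckets := freq.items.foldl (fun d p => d.modify p.2 [] (fun l => l ++ [p.1])) (PySem.Dict.empty : PySem.Dict Int (List Int))
     match PySem.List.max? buckets.keys (fun v => v) with
     | none => (([] : List Int), ([] : List Int))
     | some maxCount =>
         match PySem.List.min? buckets.keys (fun v => v) with
         | none => (([] : List Int), ([] : List Int))
         | some minCount =>
             (PySem.List.sorted (buckets.getD maxCount []) (fun x => x) false,
              PySem.List.sorted (buckets.getD minCount []) (fun x => x) false)) := by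
  have hmemeq : ∀ x, x ∈ freq.values ↔
      x ∈ (freq.items.foldl (fun d p => d.modify p.2 [] (fun l => l ++ [p.1])) (PySem.Dict.empty : PySem.Dict Int (List Int))).keys := by
    intro x; exact (buckets_keys_mem freq.items x).symm
  simp only []
  rw [← max?_id_congr_mem _ _ hmemeq, ← min?_id_congr_mem _ _ hmemeq]
  cases hM : PySem.List.max? freq.values (fun v => v) with
  | none => cases hm : PySem.List.min? freq.values (fun v => v) <;> rfl
  | some maxCount =>
      cases hm : PySem.List.min? freq.values (fun v => v) with
      | none => rfl
      | some minCount => simp only [buckets_getD]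

-- ===== VERDICT (by name: the statement is the Claim_ definition above) =====
theorem highestLowestFreqAll_spec : Claim_equal_highestLowestFreqAll := by
  intro arr _ _
  unfold Spec_highestLowestFreqAll highestLowestFreqAll highestLowestFreqAll_alt
  exact cores_agree _
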